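-- pv_equiv track=rewrite | github.com/nilfm/task-bot | bot.py | parse_add_shopping_list
-- ===== SOURCE A (Python) =====
-- from collections import defaultdict
--
-- def parse_add_shopping_list(args):
--     if len(args) == 0:
--         raise ValueError("Invalid command: nothing to buy.")
--     items = defaultdict(int)
--     forced_word = False
--     prev_num = 1
--     if args[-1].isdigit():
--         raise ValueError("Invalid command: ends with a number.")
--     for word in args:
--         if word.isdigit():
--             if forced_word:
--                 raise ValueError("Invalid command: two consecutive numbers.")
--             num = int(word)
--             if num == 0:
--                 raise ValueError("Invalid command: can't buy 0 things.")
--             prev_num = num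
--             forced_word = True
--         else:
--             forced_word = False
--             items[word] += prev_num
--             prev_num = 1
--     return items
-- ===== SOURCE B (Python) =====
-- from collections import defaultdict
--
-- def _qty(prev):
--     return int(prev) if prev is not None and prev.isdigit() else 1
--
-- def parse_add_shopping_list(args):
--     if len(args) == 0:
--         raise ValueError("Invalid command: nothing to buy.")
--     if args[-1].isdigit():
--         raise ValueError("Invalid command: ends with a number.")
--     # pass 1: validate
--     for prev, w in zip([None] + args, args):
--         if w.isdigit():
--             if prev is not None and prev.isdigit():
--                 raise ValueError("Invalid command: two consecutive numbers.")
--             if int(w) == 0: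
--                 raise ValueError("Invalid command: can't buy 0 things.")
--     # pass 2: pair every word with the token before it and aggregate
--     items = defaultdict(int)
--     for prev, w in zip([None] + args, args):
--         if not w.isdigit():
--             items[w] += _qty(prev)
--     return items
-- ===== Notes on version B (the rewrite author's own statement) =====
-- stated objective: alternative
-- what changed: Replaces A's stateful single pass (forced_word/prev_num flags carried across iterations) with two staged passes over zip([None]+args, args): a pure validation pass, then a comprehension-style pass that pairs each kept word with the token preceding it and aggregates the quantities.
import Mathlib
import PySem

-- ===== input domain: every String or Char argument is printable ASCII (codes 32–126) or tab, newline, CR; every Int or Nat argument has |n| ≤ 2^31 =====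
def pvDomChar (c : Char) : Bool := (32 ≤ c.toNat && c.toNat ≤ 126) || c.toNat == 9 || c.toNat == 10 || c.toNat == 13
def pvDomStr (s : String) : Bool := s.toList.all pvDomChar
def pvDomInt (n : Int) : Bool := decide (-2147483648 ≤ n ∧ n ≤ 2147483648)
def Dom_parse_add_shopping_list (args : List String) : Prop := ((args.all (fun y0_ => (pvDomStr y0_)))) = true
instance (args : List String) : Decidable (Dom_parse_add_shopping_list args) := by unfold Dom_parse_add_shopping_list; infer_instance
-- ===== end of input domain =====

-- B replaces A's stateful single pass (forced_word / prev_num flags carried across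
-- iterations) with two staged passes over zip([None]+args, args): a validation pass,
-- then a pairing comprehension + aggregation fold; same return value, alternative
-- decomposition (no speed claim).
-- A raises ValueError on empty args, a trailing number, two consecutive numbers, or a
-- zero quantity; those inputs are excluded by Pre_ (the ports return [] there).

-- ===== PORT A =====
-- the for-loop over args with state (items, forced_word, prev_num); none = raise
def pvALoop (l : List String) (items : PySem.Dict String Int) (forced : Bool) (prev : Int) :
    Option (PySem.Dict String Int) :=
  match l with
  | [] => some items
  | w :: rest =>
    if PySem.Str.strIsdigit w then
      if forced then none                     -- two consecutive numbers
      else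
        match PySem.Int.ofStr? w with         -- num = int(word)
        | none => none
        | some num => if num = 0 then none else pvALoop rest items true num
    else
      pvALoop rest (items.modify w 0 (· + prev)) false 1   -- items[word] += prev_num

def parse_add_shopping_list (args : List String) : List (String × Int) :=
  if args.length = 0 then []                  -- raise: nothing to buy
  else
    match PySem.List.pyGet? args (-1) with    -- args[-1]
    | none => []
    | some lastW =>
      if PySem.Str.strIsdigit lastW then []   -- raise: ends with a number
      else
        match pvALoop args PySem.Dict.empty false 1 with
        | none => []                          -- raise inside the loop
        | some d => d.items

-- ===== PORT B =====
-- prev is not None and prev.isdigit()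
def pvIsDigPrev : Option String → Bool
  | some ps => PySem.Str.strIsdigit ps
  | none => false

-- _qty(prev); int(prev) is only reached with prev.isdigit() true, so the .getD 0
-- default of the ported int() is unreachable in Python — exact
def pvQty : Option String → Int
  | some ps => if PySem.Str.strIsdigit ps then (PySem.Int.ofStr? ps).getD 0 else 1
  | none => 1

-- pass 1: the validation loop over zip([None]+args, args), carried prev as parameter;
-- false = raise (two consecutive numbers / zero / int() ValueError)
def pvBCheck (l : List String) (p : Option String) : Bool :=
  match l with
  | [] => true
  | w :: rest =>
    if PySem.Str.strIsdigit w then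
      if pvIsDigPrev p then false
      else
        match PySem.Int.ofStr? w with
        | none => false
        | some n => if n = 0 then false else pvBCheck rest (some w)
    else pvBCheck rest (some w)

-- pass 2a: the (prev, w) pairs kept by the comprehension, with their quantities
def pvBIncs (p : Option String) (l : List String) : List (String × Int) :=
  ((p :: l.map some).zip l).filterMap (fun pw =>
    if PySem.Str.strIsdigit pw.2 then none else some (pw.2, pvQty pw.1))

-- pass 2b: items[w] += q over the pairs
def pvBAgg (d : PySem.Dict String Int) (incs : List (String × Int)) : PySem.Dict String Int :=
  incs.foldl (fun d wn => d.modify wn.1 0 (· + wn.2)) d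

def parse_add_shopping_list_alt (args : List String) : List (String × Int) :=
  if args.length = 0 then []                  -- raise: nothing to buy
  else
    match PySem.List.pyGet? args (-1) with    -- args[-1]
    | none => []
    | some lastW =>
      if PySem.Str.strIsdigit lastW then []   -- raise: ends with a number
      else
        if pvBCheck args none then (pvBAgg PySem.Dict.empty (pvBIncs none args)).items
        else []                               -- raise in the validation pass

-- ===== PRECONDITION & SPEC =====
-- Pre_ excludes exactly the inputs on which A raises ValueError: empty args, a final
-- digit token, two consecutive digit tokens, or a digit token whose int value is 0.
def Pre_parse_add_shopping_list (args : List String) : Prop :=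
  args ≠ [] ∧
  args.getLast?.map PySem.Str.strIsdigit = some false ∧
  List.IsChain (fun a b => PySem.Str.strIsdigit a = false ∨ PySem.Str.strIsdigit b = false) args ∧
  (∀ w ∈ args, PySem.Str.strIsdigit w = true → PySem.Int.ofStr? w ≠ some 0)
instance (args : List String) : Decidable (Pre_parse_add_shopping_list args) := by
  unfold Pre_parse_add_shopping_list; infer_instance

def pvWitness_parse_add_shopping_list : List String := ["2", "milk", "bread", "3", "eggs", "milk"]

def Spec_parse_add_shopping_list (args : List String) (out : List (String × Int)) : Prop := out = parse_add_shopping_list_alt args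
instance (args : List String) (out : List (String × Int)) : Decidable (Spec_parse_add_shopping_list args out) := by unfold Spec_parse_add_shopping_list; infer_instance

-- ===== CLAIM (what is proved, stated in full; the proofs are below) =====
def Claim_equal_parse_add_shopping_list : Prop := ∀ (args : List String), Dom_parse_add_shopping_list args → Pre_parse_add_shopping_list args → Spec_parse_add_shopping_list args (parse_add_shopping_list args)

-- ===== LEMMAS AND PROOFS =====

-- one step of the pairing comprehension
theorem pvBIncs_cons_digit (p : Option String) (w : String) (rest : List String)
    (h : PySem.Chars.strIsdigit w.toList = true) :
    pvBIncs p (w :: rest) = pvBIncs (some w) rest := by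
  simp [pvBIncs, h]

theorem pvBIncs_cons_word (p : Option String) (w : String) (rest : List String)
    (h : PySem.Chars.strIsdigit w.toList = false) :
    pvBIncs p (w :: rest) = (w, pvQty p) :: pvBIncs (some w) rest := by
  simp [pvBIncs, h]

-- the key invariant: on a suffix with no trailing digit token, A's stateful loop with
-- state (forced, prev) = (pvIsDigPrev p, pvQty p) computes exactly B's "validate, then
-- fold the kept (word, qty) pairs" pipeline started at the same prev
theorem pvLoop_eq (l : List String) (p : Option String) (d : PySem.Dict String Int)
    (hlast : ∀ w, l.getLast? = some w → PySem.Str.strIsdigit w = false) :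
    pvALoop l d (pvIsDigPrev p) (pvQty p) =
      if pvBCheck l p then some (pvBAgg d (pvBIncs p l)) else none := by
  induction l generalizing p d with
  | nil => simp [pvALoop, pvBCheck, pvBIncs, pvBAgg]
  | cons w rest ih =>
    by_cases hw : PySem.Str.strIsdigit w = true
    · -- digit token
      have hd : PySem.Chars.strIsdigit w.toList = true := by simpa using hw
      have hrest : rest ≠ [] := by
        rintro rfl
        have := hlast w (by simp)
        rw [hw] at this; cases this
      by_cases hp : pvIsDigPrev p = true
      · simp [pvALoop, pvBCheck, hd, hp]
      · simp only [Bool.not_eq_true] at hp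
        cases hofs : PySem.Int.ofStr? w with
        | none => simp [pvALoop, pvBCheck, hd, hp, hofs]
        | some n =>
          by_cases hn : n = 0
          · simp [pvALoop, pvBCheck, hd, hp, hofs, hn]
          · have ihw := ih (some w) d (by
              intro v hv
              apply hlast
              cases rest with
              | nil => exact absurd rfl hrest
              | cons x t => simpa [List.getLast?_cons_cons] using hv)
            have hF : pvIsDigPrev (some w) = true := by simpa [pvIsDigPrev] using hw
            have hP : pvQty (some w) = n := by simp [pvQty, hd, hofs]
            rw [hF, hP] at ihw
            simp only [pvALoop, pvBCheck, hw, hp, hofs, Bool.false_eq_true, ite_false,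
              if_true, hn, pvBIncs_cons_digit p w rest hd]
            exact ihw
    · -- ordinary word
      simp only [Bool.not_eq_true] at hw
      have hd : PySem.Chars.strIsdigit w.toList = false := by simpa using hw
      have ihw := ih (some w) (d.modify w 0 (· + pvQty p)) (by
        intro v hv
        apply hlast
        cases rest with
        | nil => simp at hv
        | cons x t => simpa [List.getLast?_cons_cons] using hv)
      have hF : pvIsDigPrev (some w) = false := by simpa [pvIsDigPrev] using hw
      have hP : pvQty (some w) = 1 := by simp [pvQty, hd]
      rw [hF, hP] at ihw
      simp only [pvALoop, pvBCheck, hw, Bool.false_eq_true, ite_false,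
        pvBIncs_cons_word p w rest hd]
      rw [ihw]
      rfl

theorem parse_add_shopping_list_spec : Claim_equal_parse_add_shopping_list := by
  intro args _ hpre
  obtain ⟨hne, hlastm, _, _⟩ := hpre
  unfold Spec_parse_add_shopping_list parse_add_shopping_list parse_add_shopping_list_alt
  by_cases hlen : args.length = 0
  · simp [hlen]
  · simp only [hlen, if_false, PySem.List.pyGet?_neg_one]
    cases hl : args.getLast? with
    | none => rfl
    | some lastW =>
      by_cases hdig : PySem.Str.strIsdigit lastW = true
      · have hd : PySem.Chars.strIsdigit lastW.toList = true := by simpa using hdig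
        simp [hd]
      · simp only [Bool.not_eq_true] at hdig
        have hd : PySem.Chars.strIsdigit lastW.toList = false := by simpa using hdig
        have hlast : ∀ w, args.getLast? = some w → PySem.Str.strIsdigit w = false := by
          intro v hv; rw [hl] at hv; cases hv; exact hdig
        simp only [hdig, Bool.false_eq_true, ite_false]
        have hF : pvIsDigPrev none = false := rfl
        have hP : pvQty none = 1 := rfl
        rw [← hF, ← hP, pvLoop_eq args none PySem.Dict.empty hlast]
        by_cases hc : pvBCheck args none = true <;> simp [hc]
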